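-- pv_equiv track=rewrite | github.com/henrylong719/carl-lc | problems/HackerRank/week4/pickingNumbers.py | pickingNumbers
-- ===== SOURCE A (Python) =====
-- def pickingNumbers(a):
--     window_start = 0
--     ans = 0
--     a.sort()
--
--     for window_end in range(1, len(a)):
--         if a[window_end] - a[window_start] <= 1:
--             ans = max(ans, window_end - window_start + 1)
--         while a[window_end] - a[window_start] > 1:
--             window_start += 1
--
--     return ans
-- ===== SOURCE B (Python) =====
-- def pickingNumbers(a):
--     count = {}
--     for x in a:
--         count[x] = count.get(x, 0) + 1
--     ans = 0
--     for v, c in count.items():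
--         if c >= 2 and c > ans:
--             ans = c
--         if v + 1 in count and c + count[v + 1] > ans:
--             ans = c + count[v + 1]
--     return ans
-- ===== Notes on version B (the rewrite author's own statement) =====
-- stated objective: alternative
-- what changed: Replaces A's sort + sliding-window scan (A also sorts its argument in place; B leaves it untouched) with a one-pass value counter: B tallies occurrences in a dict and maximises, over each value v, count[v]+count[v+1] when v+1 occurs and count[v] alone when it is at least 2 — exactly the windows A's scan can record.
import Mathlib
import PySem

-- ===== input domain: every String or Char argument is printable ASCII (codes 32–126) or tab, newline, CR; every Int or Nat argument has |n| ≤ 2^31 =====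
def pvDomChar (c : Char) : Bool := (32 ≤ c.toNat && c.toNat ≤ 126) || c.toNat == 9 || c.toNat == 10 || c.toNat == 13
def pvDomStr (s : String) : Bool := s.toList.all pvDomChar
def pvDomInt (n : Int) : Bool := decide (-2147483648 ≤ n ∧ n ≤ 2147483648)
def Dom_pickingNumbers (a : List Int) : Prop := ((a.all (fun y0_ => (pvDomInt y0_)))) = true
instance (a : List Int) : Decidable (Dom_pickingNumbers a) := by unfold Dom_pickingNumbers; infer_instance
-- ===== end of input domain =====

-- B replaces A's sort + sliding window with a one-pass value counter (different algorithm, no sort);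
-- A sorts its argument in place (B does not) — the equivalence proved here is about the return value.

-- ===== PORT A =====
-- the inner 'while a[window_end] - a[window_start] > 1: window_start += 1' (fuel = len(a), ample:
-- window_start never passes window_end, where the difference is 0)
def pickingAdvance (s : List Int) (we : Int) : Nat → Int → Int
  | 0, ws => ws
  | fuel + 1, ws =>
    if PySem.List.pyGetD s we 0 - PySem.List.pyGetD s ws 0 > 1 then
      pickingAdvance s we fuel (ws + 1)
    else ws

def pickingNumbers (a : List Int) : Int :=
  let s := PySem.List.sorted a (fun x => x)
  let st := (PySem.List.pyRange 1 (s.length : Int)).foldl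
    (fun (p : Int × Int) we =>
      let ans := if PySem.List.pyGetD s we 0 - PySem.List.pyGetD s p.1 0 ≤ 1
                 then max p.2 (we - p.1 + 1) else p.2
      (pickingAdvance s we s.length p.1, ans))
    (0, 0)
  st.2

-- ===== PORT B =====
def pickingNumbers_alt (a : List Int) : Int :=
  let count := a.foldl (fun d x => d.insert x (d.getD x 0 + 1)) PySem.Dict.empty
  count.items.foldl
    (fun ans vc =>
      let ans := if 2 ≤ vc.2 ∧ ans < vc.2 then vc.2 else ans
      if count.contains (vc.1 + 1) = true ∧ ans < vc.2 + count.getD (vc.1 + 1) 0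
      then vc.2 + count.getD (vc.1 + 1) 0 else ans)
    0

-- ===== PRECONDITION & SPEC =====
def Spec_pickingNumbers (a : List Int) (out : Int) : Prop := out = pickingNumbers_alt a
instance (a : List Int) (out : Int) : Decidable (Spec_pickingNumbers a out) := by unfold Spec_pickingNumbers; infer_instance

-- ===== CLAIM (what is proved, stated in full; the proofs are below) =====
def Claim_equal_pickingNumbers : Prop := ∀ (a : List Int), Dom_pickingNumbers a → Spec_pickingNumbers a (pickingNumbers a)

-- ===== LEMMAS AND PROOFS =====

-- gI s k = s[k] (default 0); all index arithmetic below is on the sorted list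
def gI (s : List Int) (k : Nat) : Int := s.getD k 0

-- m(j) = the smallest window start i with s[j] - s[i] ≤ 1 (total: at i = j the difference is 0)
def mIdx (s : List Int) (j : Nat) : Nat :=
  Nat.find (p := fun i => gI s j - gI s i ≤ 1) ⟨j, by simp [gI]⟩

-- the recorded answers of A's loop after processing window_end = 1..k
def ansUpTo (s : List Int) : Nat → Int
  | 0 => 0
  | k + 1 =>
    if gI s (k + 1) - gI s (mIdx s k) ≤ 1
    then max (ansUpTo s k) ((k + 1 : Int) - (mIdx s k : Int) + 1)
    else ansUpTo s k

-- the candidate values of B: counts of a value (≥ 2) or of two adjacent values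
def Good (a : List Int) (n : Int) : Prop :=
  ∃ v, v ∈ a ∧ ((n = (a.count v : Int) ∧ 2 ≤ (a.count v : Int)) ∨
                (n = (a.count v : Int) + (a.count (v + 1) : Int) ∧ (v + 1) ∈ a))

theorem sorted_getD_mono {s : List Int} (hs : s.Pairwise (· ≤ ·)) {i j : Nat}
    (hij : i ≤ j) (hj : j < s.length) : gI s i ≤ gI s j := by
  rcases Nat.eq_or_lt_of_le hij with h | h
  · subst h; exact le_refl _
  · have hi : i < s.length := lt_trans h hj
    unfold gI
    rw [List.getD_eq_getElem s 0 hi, List.getD_eq_getElem s 0 hj]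
    exact List.pairwise_iff_getElem.mp hs i j hi hj h

theorem mIdx_le (s : List Int) (j : Nat) : mIdx s j ≤ j := by
  unfold mIdx
  exact Nat.find_le (n := j) (p := fun i => gI s j - gI s i ≤ 1) (by omega)

theorem mIdx_spec (s : List Int) (j : Nat) : gI s j - gI s (mIdx s j) ≤ 1 := by
  unfold mIdx
  exact Nat.find_spec (p := fun i => gI s j - gI s i ≤ 1) ⟨j, by omega⟩

theorem mIdx_min (s : List Int) (j : Nat) {i : Nat} (h : i < mIdx s j) :
    ¬ (gI s j - gI s i ≤ 1) := by
  unfold mIdx at h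
  exact Nat.find_min _ h

theorem mIdx_mono {s : List Int} (hs : s.Pairwise (· ≤ ·)) {j j' : Nat}
    (h : j ≤ j') (hj' : j' < s.length) : mIdx s j ≤ mIdx s j' := by
  have hj : j < s.length := lt_of_le_of_lt (by omega) hj'
  have hg : gI s j ≤ gI s j' := sorted_getD_mono hs h hj'
  unfold mIdx
  exact Nat.find_mono (fun i hi => by omega)

theorem advance_eq (s : List Int) (j : Nat) :
    ∀ (fuel w : Nat), w ≤ mIdx s j → mIdx s j - w ≤ fuel →
    pickingAdvance s (j : Int) fuel (w : Int) = (mIdx s j : Int) := by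
  intro fuel
  induction fuel with
  | zero =>
    intro w hw hf
    have : w = mIdx s j := by omega
    subst this; rfl
  | succ fuel ih =>
    intro w hw hf
    rw [pickingAdvance]
    rcases Nat.eq_or_lt_of_le hw with h | h
    · subst h
      have := mIdx_spec s j
      simp only [PySem.List.pyGetD_natCast]
      rw [if_neg (by unfold gI at this; omega)]
    · have hcond := mIdx_min s j h
      simp only [PySem.List.pyGetD_natCast]
      rw [if_pos (by unfold gI at hcond; omega)]
      have : ((w : Int) + 1) = ((w + 1 : Nat) : Int) := by push_cast; ring
      rw [this]
      exact ih (w + 1) (by omega) (by omega)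

theorem loop_eq {s : List Int} (hs : s.Pairwise (· ≤ ·)) (k : Nat) (hk : k < s.length) :
    (PySem.List.pyRange 1 ((k + 1 : Nat) : Int)).foldl
      (fun (p : Int × Int) we =>
        let ans := if PySem.List.pyGetD s we 0 - PySem.List.pyGetD s p.1 0 ≤ 1
                   then max p.2 (we - p.1 + 1) else p.2
        (pickingAdvance s we s.length p.1, ans))
      (0, 0) = ((mIdx s k : Int), ansUpTo s k) := by
  induction k with
  | zero =>
    have h0 : PySem.List.pyRange 1 ((1 : Nat) : Int) = [] := by decide
    rw [h0]
    have : mIdx s 0 = 0 := Nat.le_zero.mp (mIdx_le s 0)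
    simp [List.foldl, this, ansUpTo]
  | succ k ih =>
    have hk' : k < s.length := by omega
    have hr : PySem.List.pyRange 1 ((k + 1 + 1 : Nat) : Int) =
        PySem.List.pyRange 1 ((k + 1 : Nat) : Int) ++ [((k + 1 : Nat) : Int)] := by
      have : ((k + 1 + 1 : Nat) : Int) = ((k + 1 : Nat) : Int) + 1 := by push_cast; ring
      rw [this]
      exact PySem.List.pyRange_one_succ_right (by push_cast; omega)
    rw [hr, List.foldl_append, ih hk']
    simp only [List.foldl, PySem.List.pyGetD_natCast]
    have hadv : pickingAdvance s ((k + 1 : Nat) : Int) s.length ((mIdx s k : Nat) : Int)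
        = ((mIdx s (k + 1) : Nat) : Int) := by
      apply advance_eq
      · exact mIdx_mono hs (by omega) hk
      · have := mIdx_le s (k + 1)
        omega
    rw [hadv]
    show (_, if gI s (k+1) - gI s (mIdx s k) ≤ 1
             then max (ansUpTo s k) (((k + 1 : Nat) : Int) - ((mIdx s k : Nat) : Int) + 1)
             else ansUpTo s k) = _
    rw [show ansUpTo s (k+1) = if gI s (k + 1) - gI s (mIdx s k) ≤ 1
        then max (ansUpTo s k) ((k + 1 : Int) - (mIdx s k : Int) + 1)
        else ansUpTo s k from rfl]
    push_cast
    rfl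

theorem ansUpTo_nonneg (s : List Int) (k : Nat) : 0 ≤ ansUpTo s k := by
  induction k with
  | zero => simp [ansUpTo]
  | succ k ih =>
    rw [ansUpTo]
    split_ifs
    · exact le_trans ih (le_max_left _ _)
    · exact ih

theorem rec_le_ansUpTo (s : List Int) {j k : Nat} (h1 : 1 ≤ j) (hk : j ≤ k)
    (hP : gI s j - gI s (mIdx s (j - 1)) ≤ 1) :
    (j : Int) - (mIdx s (j - 1) : Int) + 1 ≤ ansUpTo s k := by
  induction k with
  | zero => omega
  | succ k ih =>
    rw [ansUpTo]
    rcases Nat.eq_or_lt_of_le hk with h | h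
    · subst h
      simp only [Nat.add_sub_cancel] at hP
      rw [if_pos hP]
      push_cast
      exact le_max_right _ _
    · have hle := ih (by omega)
      split_ifs
      · exact le_trans hle (le_max_left _ _)
      · exact hle

theorem ansUpTo_cases (s : List Int) (k : Nat) :
    ansUpTo s k = 0 ∨ ∃ j, 1 ≤ j ∧ j ≤ k ∧ gI s j - gI s (mIdx s (j - 1)) ≤ 1 ∧
      ansUpTo s k = (j : Int) - (mIdx s (j - 1) : Int) + 1 := by
  induction k with
  | zero => left; rfl
  | succ k ih =>
    rw [ansUpTo]
    split_ifs with h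
    · rcases le_total (ansUpTo s k) ((k + 1 : Int) - (mIdx s k : Int) + 1) with hm | hm
      · right
        refine ⟨k + 1, by omega, by omega, by simpa using h, ?_⟩
        rw [max_eq_right (by omega)]
        simp only [Nat.add_sub_cancel]
        push_cast
        ring
      · rw [max_eq_left (by omega)]
        rcases ih with h0 | ⟨j, hj1, hjk, hjP, hje⟩
        · exact Or.inl h0
        · exact Or.inr ⟨j, hj1, by omega, hjP, hje⟩
    · rcases ih with h0 | ⟨j, hj1, hjk, hjP, hje⟩
      · exact Or.inl h0
      · exact Or.inr ⟨j, hj1, by omega, hjP, hje⟩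

theorem descent {s : List Int} (hs : s.Pairwise (· ≤ ·)) :
    ∀ j, j < s.length → mIdx s j < j →
    ∃ j', 1 ≤ j' ∧ j' ≤ j ∧ mIdx s j' = mIdx s (j' - 1) ∧
      (j : Int) - (mIdx s j : Int) ≤ (j' : Int) - (mIdx s j' : Int) := by
  intro j
  induction j using Nat.strong_induction_on with
  | _ j ih =>
    intro hj hmj
    have h1 : 1 ≤ j := by omega
    rcases Nat.eq_or_lt_of_le (mIdx_mono hs (show j - 1 ≤ j by omega) hj) with heq | hlt
    · exact ⟨j, h1, le_refl j, heq.symm, le_refl _⟩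
    · -- mIdx (j-1) < mIdx j: move to j - 1
      have hm1 : mIdx s (j - 1) < j - 1 := by
        have := mIdx_le s j
        omega
      have hj1 : j - 1 < s.length := by omega
      obtain ⟨j', a1, a2, a3, a4⟩ := ih (j - 1) (by omega) hj1 hm1
      refine ⟨j', a1, by omega, a3, ?_⟩
      have c1 : ((j - 1 : Nat) : Int) = (j : Int) - 1 := by omega
      have c2 : ((mIdx s (j - 1) : Nat) : Int) < ((mIdx s j : Nat) : Int) := by
        exact_mod_cast hlt
      omega

theorem window_le_ansUpTo {s : List Int} (hs : s.Pairwise (· ≤ ·)) {i j : Nat}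
    (hij : i < j) (hj : j < s.length) (hP : gI s j - gI s i ≤ 1) :
    (j : Int) - (i : Int) + 1 ≤ ansUpTo s (s.length - 1) := by
  have hmi : mIdx s j ≤ i := Nat.find_le (p := fun i => gI s j - gI s i ≤ 1) hP
  have hmj : mIdx s j < j := by omega
  obtain ⟨j', a1, a2, a3, a4⟩ := descent hs j hj hmj
  have hP' : gI s j' - gI s (mIdx s (j' - 1)) ≤ 1 := by
    rw [← a3]; exact mIdx_spec s j'
  have hrec := rec_le_ansUpTo s a1 (show j' ≤ s.length - 1 by omega) hP'
  have c : ((mIdx s j' : Nat) : Int) = ((mIdx s (j' - 1) : Nat) : Int) := by rw [a3]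
  omega

theorem countP_split (s : List Int) (v : Int) :
    s.countP (fun x => decide (x ≤ v + 1)) =
      s.countP (fun x => decide (x < v)) + (s.count v + s.count (v + 1)) := by
  induction s with
  | nil => simp
  | cons x t ih =>
    simp only [List.countP_cons, List.count_cons, ih, decide_eq_true_eq, beq_iff_eq]
    split_ifs <;> omega

theorem segment_le_countP (s : List Int) (p : Int → Bool) :
    ∀ (i j : Nat), j < s.length → i ≤ j → (∀ k, i ≤ k → k ≤ j → p (gI s k) = true) →
    j + 1 - i ≤ s.countP p := by
  intro i j hj hij h
  set t := (s.drop i).take (j + 1 - i) with ht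
  have hlen : t.length = j + 1 - i := by
    simp [ht, List.length_take, List.length_drop]
    omega
  have hall : ∀ x ∈ t, p x = true := by
    intro x hx
    obtain ⟨m, hm, he⟩ := List.getElem_of_mem hx
    have hm' : m < j + 1 - i := by omega
    have hmd : m < (s.drop i).length := by simp [List.length_drop]; omega
    have hx2 : t[m] = s[i + m]'(by simp at hmd ⊢; omega) := by
      simp [ht, List.getElem_take, List.getElem_drop]
    have := h (i + m) (by omega) (by omega)
    rw [← he, hx2]
    unfold gI at this
    rwa [List.getD_eq_getElem s 0 (by simp at hmd ⊢; omega)] at this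
  have hcount : t.countP p = t.length := List.countP_eq_length.mpr hall
  have h1 : t.countP p ≤ (s.drop i).countP p := by
    conv_rhs => rw [← List.take_append_drop (j + 1 - i) (s.drop i)]
    rw [List.countP_append, ← ht]
    omega
  have h2 : (s.drop i).countP p ≤ s.countP p := by
    conv_rhs => rw [← List.take_append_drop i s]
    rw [List.countP_append]
    omega
  omega

theorem countP_between (s : List Int) (v : Int) :
    s.countP (fun x => decide (v ≤ x ∧ x ≤ v + 1)) = s.count v + s.count (v + 1) := by
  induction s with
  | nil => simp
  | cons x t ih =>
    simp only [List.countP_cons, List.count_cons, ih, decide_eq_true_eq, beq_iff_eq]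
    split_ifs <;> omega

theorem countP_not_add (s : List Int) (v : Int) :
    s.countP (fun x => decide (x ≤ v + 1)) + s.countP (fun x => !decide (x ≤ v + 1)) = s.length := by
  induction s with
  | nil => simp
  | cons x t ih =>
    simp only [List.countP_cons, List.length_cons]
    by_cases h : x ≤ v + 1 <;> simp [h] <;> omega

theorem window_le_counts {s : List Int} (hs : s.Pairwise (· ≤ ·)) {i j : Nat}
    (hij : i ≤ j) (hj : j < s.length) (hP : gI s j - gI s i ≤ 1) :
    (j : Int) - (i : Int) + 1 ≤ (s.count (gI s i) : Int) + (s.count (gI s i + 1) : Int) := by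
  have hseg := segment_le_countP s (fun x => decide (gI s i ≤ x ∧ x ≤ gI s i + 1)) i j hj hij ?_
  · have hb := countP_between s (gI s i)
    omega
  · intro k hk1 hk2
    have h1 : gI s i ≤ gI s k := sorted_getD_mono hs hk1 (by omega)
    have h2 : gI s k ≤ gI s j := sorted_getD_mono hs hk2 hj
    simp only [decide_eq_true_eq]
    omega

theorem counts_le_window {s : List Int} (hs : s.Pairwise (· ≤ ·)) {v : Int}
    (h2 : 2 ≤ s.count v + s.count (v + 1)) :
    ∃ i j, i < j ∧ j < s.length ∧ gI s j - gI s i ≤ 1 ∧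
      ((s.count v : Int) + (s.count (v + 1) : Int)) ≤ (j : Int) - (i : Int) + 1 := by
  set lo := s.countP (fun x => decide (x < v)) with hlo
  set hi := s.countP (fun x => decide (x ≤ v + 1)) with hhi
  have hsplit : hi = lo + (s.count v + s.count (v + 1)) := countP_split s v
  have hin : hi ≤ s.length := List.countP_le_length
  have hA : v ≤ gI s lo := by
    by_contra hA
    push Not at hA
    have hseg := segment_le_countP s (fun x => decide (x < v)) 0 lo (by omega) (by omega) ?_
    · omega
    · intro k _ hk2
      have := sorted_getD_mono hs hk2 (by omega)
      simp only [decide_eq_true_eq]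
      omega
  have hB : gI s (hi - 1) ≤ v + 1 := by
    by_contra hB
    push Not at hB
    have hseg := segment_le_countP s (fun x => !decide (x ≤ v + 1)) (hi - 1) (s.length - 1)
      (by omega) (by omega) ?_
    · have := countP_not_add s v
      omega
    · intro k hk1 hk2
      have := sorted_getD_mono hs hk1 (show k < s.length by omega)
      have hng : ¬ (gI s k ≤ v + 1) := by omega
      simp [hng]
  refine ⟨lo, hi - 1, by omega, by omega, by omega, by omega⟩

def stepB (a : List Int) (ans v : Int) : Int :=
  let ans' := if 2 ≤ (a.count v : Int) ∧ ans < (a.count v : Int) then (a.count v : Int) else ans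
  if a.contains (v + 1) = true ∧ ans' < (a.count v : Int) + (a.count (v + 1) : Int)
  then (a.count v : Int) + (a.count (v + 1) : Int) else ans'

theorem stepB_def (a : List Int) (ans v : Int) : stepB a ans v =
    if a.contains (v + 1) = true ∧
        (if 2 ≤ (a.count v : Int) ∧ ans < (a.count v : Int) then (a.count v : Int) else ans)
          < (a.count v : Int) + (a.count (v + 1) : Int)
    then (a.count v : Int) + (a.count (v + 1) : Int)
    else (if 2 ≤ (a.count v : Int) ∧ ans < (a.count v : Int) then (a.count v : Int) else ans) := rfl

theorem portB_eq_fold (a : List Int) :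
    pickingNumbers_alt a = (PySem.Set.ofList a).foldl (stepB a) 0 := by
  unfold pickingNumbers_alt
  simp only [PySem.Dict.foldl_insert_getD_add_one_eq_counter, PySem.Dict.items_counter,
    List.foldl_map, PySem.Dict.contains_counter, PySem.Dict.getD_counter]
  rfl

theorem step_mono (a : List Int) (ans v : Int) : ans ≤ stepB a ans v := by
  rw [stepB_def]
  split_ifs <;> omega

theorem fold_mono (a : List Int) : ∀ (u : List Int) (ans : Int), ans ≤ u.foldl (stepB a) ans := by
  intro u
  induction u with
  | nil => intro ans; exact le_refl _
  | cons x t ih => intro ans; exact le_trans (step_mono a ans x) (ih _)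

theorem cand_le_fold (a : List Int) :
    ∀ (u : List Int) (ans : Int) (v : Int), v ∈ u →
    (2 ≤ (a.count v : Int) → (a.count v : Int) ≤ u.foldl (stepB a) ans) ∧
    ((v + 1) ∈ a → (a.count v : Int) + (a.count (v + 1) : Int) ≤ u.foldl (stepB a) ans) := by
  intro u
  induction u with
  | nil => intro ans v hv; cases hv
  | cons x t ih =>
    intro ans v hv
    rcases List.mem_cons.mp hv with rfl | hvt
    · have hc' : (0 : Int) ≤ (a.count (v + 1) : Int) := Int.natCast_nonneg _
      constructor
      · intro h2
        refine le_trans ?_ (fold_mono a t (stepB a ans v))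
        rw [stepB_def]
        by_cases hin : ans < (a.count v : Int)
        · rw [if_pos (show 2 ≤ (a.count v : Int) ∧ ans < (a.count v : Int) from ⟨h2, hin⟩)]
          split_ifs <;> omega
        · rw [if_neg (show ¬(2 ≤ (a.count v : Int) ∧ ans < (a.count v : Int)) from fun hh => hin hh.2)]
          split_ifs <;> omega
      · intro hmem
        refine le_trans ?_ (fold_mono a t (stepB a ans v))
        have hc : a.contains (v + 1) = true := by simpa using hmem
        rw [stepB_def]
        by_cases hmid : (if 2 ≤ (a.count v : Int) ∧ ans < (a.count v : Int)
            then (a.count v : Int) else ans) < (a.count v : Int) + (a.count (v + 1) : Int)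
        · rw [if_pos ⟨hc, hmid⟩]
        · rw [if_neg (fun hh => hmid hh.2)]
          omega
    · exact ih (stepB a ans x) v hvt

theorem fold_cases (a : List Int) :
    ∀ (u : List Int) (ans : Int), (∀ v ∈ u, v ∈ a) → (ans = 0 ∨ Good a ans) →
    (u.foldl (stepB a) ans = 0 ∨ Good a (u.foldl (stepB a) ans)) := by
  intro u
  induction u with
  | nil => intro ans _ h; exact h
  | cons x t ih =>
    intro ans hmem h
    refine ih (stepB a ans x) (fun v hv => hmem v (List.mem_cons_of_mem _ hv)) ?_
    have hxa : x ∈ a := hmem x List.mem_cons_self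
    rw [stepB_def]
    split_ifs with h1 h2 h3
    · right; exact ⟨x, hxa, Or.inr ⟨rfl, by simpa using h2.1⟩⟩
    · right; exact ⟨x, hxa, Or.inl ⟨rfl, h1.1⟩⟩
    · right; exact ⟨x, hxa, Or.inr ⟨rfl, by simpa using h3.1⟩⟩
    · exact h

theorem portA_eq_ansUpTo (a : List Int) (h : a ≠ []) :
    pickingNumbers a = ansUpTo (PySem.List.sorted a (fun x => x))
      ((PySem.List.sorted a (fun x => x)).length - 1) := by
  have hs : (PySem.List.sorted a (fun x => x)).Pairwise (· ≤ ·) := by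
    simpa using PySem.List.sorted_pairwise a (fun x => x)
  have hlen : (PySem.List.sorted a (fun x => x)).length = a.length :=
    (PySem.List.sorted_perm a (fun x => x) false).length_eq
  have hn : 0 < (PySem.List.sorted a (fun x => x)).length := by
    rw [hlen]
    exact List.length_pos_iff.mpr h
  show ((PySem.List.pyRange 1 ((PySem.List.sorted a (fun x => x)).length : Int)).foldl _ (0, 0)).2 = _
  have hc : ((PySem.List.sorted a (fun x => x)).length : Int)
      = (((PySem.List.sorted a (fun x => x)).length - 1 + 1 : Nat) : Int) := by omega
  rw [hc, loop_eq hs ((PySem.List.sorted a (fun x => x)).length - 1) (by omega)]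

theorem portB_nonneg (a : List Int) : 0 ≤ pickingNumbers_alt a := by
  rw [portB_eq_fold]
  exact fold_mono a _ 0

theorem portB_cases (a : List Int) :
    pickingNumbers_alt a = 0 ∨ Good a (pickingNumbers_alt a) := by
  rw [portB_eq_fold]
  exact fold_cases a _ 0 (fun v hv => (PySem.Set.mem_ofList a v).mp hv) (Or.inl rfl)

theorem cand_le_portB (a : List Int) {v : Int} (hv : v ∈ a) :
    (2 ≤ (a.count v : Int) → (a.count v : Int) ≤ pickingNumbers_alt a) ∧
    ((v + 1) ∈ a → (a.count v : Int) + (a.count (v + 1) : Int) ≤ pickingNumbers_alt a) := by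
  rw [portB_eq_fold]
  exact cand_le_fold a _ 0 v ((PySem.Set.mem_ofList a v).mpr hv)

-- ===== VERDICT (by name: the statement is the Claim_ definition above) =====
theorem pickingNumbers_spec : Claim_equal_pickingNumbers := by
  unfold Claim_equal_pickingNumbers
  intro a _
  unfold Spec_pickingNumbers
  by_cases h : a = []
  · subst h; decide
  · have hs : (PySem.List.sorted a (fun x => x)).Pairwise (· ≤ ·) := by
      simpa using PySem.List.sorted_pairwise a (fun x => x)
    set s := PySem.List.sorted a (fun x => x) with hsdef
    have hperm : s.Perm a := PySem.List.sorted_perm a (fun x => x) false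
    have hn : 0 < s.length := by
      rw [hperm.length_eq]
      exact List.length_pos_iff.mpr h
    have hcount : ∀ v, s.count v = a.count v := fun v => hperm.count_eq v
    rw [portA_eq_ansUpTo a h, ← hsdef]
    apply le_antisymm
    · -- every value A records is bounded by one of B's candidates
      rcases ansUpTo_cases s (s.length - 1) with h0 | ⟨j, hj1, hjk, hjP, hje⟩
      · rw [h0]; exact portB_nonneg a
      · rw [hje]
        have hii : mIdx s (j - 1) ≤ j - 1 := mIdx_le s (j - 1)
        have hjlt : j < s.length := by omega
        have hwc := window_le_counts hs (show mIdx s (j - 1) ≤ j by omega) hjlt hjP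
        rw [hcount, hcount] at hwc
        have hvmem : gI s (mIdx s (j - 1)) ∈ a := by
          refine hperm.mem_iff.mp ?_
          unfold gI
          rw [List.getD_eq_getElem s 0 (by omega)]
          exact List.getElem_mem _
        by_cases hv1 : (gI s (mIdx s (j - 1)) + 1) ∈ a
        · have := (cand_le_portB a hvmem).2 hv1
          omega
        · have hz : a.count (gI s (mIdx s (j - 1)) + 1) = 0 := List.count_eq_zero.mpr hv1
          have h2 : 2 ≤ (a.count (gI s (mIdx s (j - 1))) : Int) := by omega
          have := (cand_le_portB a hvmem).1 h2
          omega
    · -- every candidate of B is realised by a window A records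
      rcases portB_cases a with h0 | ⟨v, hv, hcase⟩
      · rw [h0]; exact ansUpTo_nonneg s _
      · have hv1le : 1 ≤ a.count v := List.count_pos_iff.mpr hv
        have hwin : 2 ≤ s.count v + s.count (v + 1) →
            ((a.count v : Int) + (a.count (v + 1) : Int)) ≤ ansUpTo s (s.length - 1) := by
          intro h2'
          obtain ⟨i, j, hij, hjn, hPij, hcw⟩ := counts_le_window hs h2'
          have := window_le_ansUpTo hs hij hjn hPij
          rw [hcount, hcount] at hcw
          omega
        rcases hcase with ⟨he, h2⟩ | ⟨he, hvmem1⟩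
        · have hz : (0 : Int) ≤ (a.count (v + 1) : Int) := Int.natCast_nonneg _
          have := hwin (by rw [hcount, hcount]; omega)
          omega
        · have hv2le : 1 ≤ a.count (v + 1) := List.count_pos_iff.mpr hvmem1
          have := hwin (by rw [hcount, hcount]; omega)
          omega
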